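-- pv_equiv track=rewrite | github.com/ravin-d-27/Data_Structures_Questions | mypractice/Infosys/SubArray.py | count_good_subarrays
-- ===== SOURCE A (Python) =====
-- def count_good_subarrays(N, K, A):
--     MOD = 10**9 + 7
--     good_subarrays_count = 0
--
--     # Iterate over all possible starting points of the subarray
--     for start in range(N):
--         frequency = {}
--         # Iterate over all possible ending points of the subarray
--         for end in range(start, N):
--             element = A[end]
--             # Update the frequency of the current element
--             if element in frequency:
--                 frequency[element] += 1
--             else:
--                 frequency[element] = 1
--
--             # Check if the current subarray is good
--             good = True
--             for key in frequency:
--                 if frequency[key] != 0 and frequency[key] != K: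
--                     good = False
--                     break
--
--             if good:
--                 good_subarrays_count = (good_subarrays_count + 1) % MOD
--
--     return good_subarrays_count
-- ===== SOURCE B (Python) =====
-- def count_good_subarrays(N, K, A):
--     MOD = 10**9 + 7
--     total = 0
--     for start in range(N):
--         freq = {}
--         bad = 0  # number of distinct elements whose current frequency differs from K
--         for end in range(start, N):
--             x = A[end]
--             old = freq.get(x, 0)
--             freq[x] = old + 1
--             if old != 0 and old != K:
--                 bad -= 1
--             if old + 1 != K:
--                 bad += 1
--             if bad == 0:
--                 total = (total + 1) % MOD
--     return total
-- ===== Notes on version B (the rewrite author's own statement) =====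
-- stated objective: alternative
-- what changed: Instead of rescanning the frequency dict after each extension to test goodness, B incrementally maintains a counter of distinct elements whose frequency differs from K and tests counter == 0, removing the inner scan (O(N^2) worst case vs A's O(N^3) worst case; A's early break makes the measured difference only a constant factor on random inputs).
import Mathlib
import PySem

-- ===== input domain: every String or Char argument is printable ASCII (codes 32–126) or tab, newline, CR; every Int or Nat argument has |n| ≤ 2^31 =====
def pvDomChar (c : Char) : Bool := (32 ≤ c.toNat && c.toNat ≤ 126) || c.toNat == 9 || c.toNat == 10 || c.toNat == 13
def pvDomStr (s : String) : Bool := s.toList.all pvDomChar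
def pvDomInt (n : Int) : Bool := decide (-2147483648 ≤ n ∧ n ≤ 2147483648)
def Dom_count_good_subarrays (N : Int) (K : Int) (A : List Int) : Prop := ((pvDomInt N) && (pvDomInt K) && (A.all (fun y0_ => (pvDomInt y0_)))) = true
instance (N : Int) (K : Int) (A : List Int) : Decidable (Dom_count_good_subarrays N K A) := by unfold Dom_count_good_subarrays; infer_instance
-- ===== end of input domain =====

-- B replaces A's rescan of the frequency dict after each extension by an incrementally
-- maintained count of elements whose frequency differs from K (objective: alternative).

-- ===== PORT A =====
-- the inner `for key in frequency: … break` goodness scan of A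
def pvGoodScan (K : Int) (d : PySem.Dict Int Int) : List Int → Bool
  | [] => true
  | k :: rest =>
      if d.getD k 0 ≠ 0 ∧ d.getD k 0 ≠ K then false else pvGoodScan K d rest

-- one iteration of A's inner `for end in range(start, N)` loop; state = (frequency, good_subarrays_count)
def pvAStep (K : Int) (A : List Int) (st : PySem.Dict Int Int × Int) (e : Int) :
    PySem.Dict Int Int × Int :=
  let element := (PySem.List.pyGet? A e).getD 0   -- Pre_ guarantees the index is in range
  let freq :=
    if st.1.contains element then st.1.insert element (st.1.getD element 0 + 1)
    else st.1.insert element 1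
  let good := pvGoodScan K freq freq.keys
  (freq, if good then PySem.Int.mod (st.2 + 1) (10 ^ 9 + 7) else st.2)

def count_good_subarrays (N : Int) (K : Int) (A : List Int) : Int :=
  (PySem.List.pyRange 0 N 1).foldl
    (fun cnt start =>
      ((PySem.List.pyRange start N 1).foldl (pvAStep K A) (PySem.Dict.empty, cnt)).2)
    0

-- ===== PORT B =====
-- one iteration of B's inner loop; state = (freq, bad, total)
def pvBStep (K : Int) (A : List Int) (st : PySem.Dict Int Int × Int × Int) (e : Int) :
    PySem.Dict Int Int × Int × Int :=
  let x := (PySem.List.pyGet? A e).getD 0   -- Pre_ guarantees the index is in range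
  let old := st.1.getD x 0
  let freq := st.1.insert x (old + 1)
  let bad := st.2.1 + (if old ≠ 0 ∧ old ≠ K then -1 else 0) + (if old + 1 ≠ K then 1 else 0)
  (freq, bad, if bad = 0 then PySem.Int.mod (st.2.2 + 1) (10 ^ 9 + 7) else st.2.2)

def count_good_subarrays_alt (N : Int) (K : Int) (A : List Int) : Int :=
  (PySem.List.pyRange 0 N 1).foldl
    (fun total start =>
      ((PySem.List.pyRange start N 1).foldl (pvBStep K A) (PySem.Dict.empty, 0, total)).2.2)
    0

-- ===== PRECONDITION & SPEC =====
-- Pre_ excludes exactly the inputs where A raises IndexError: N larger than len(A) makes A[end] go out of range.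
def Pre_count_good_subarrays (N : Int) (K : Int) (A : List Int) : Prop := N ≤ (A.length : Int)
instance (N : Int) (K : Int) (A : List Int) : Decidable (Pre_count_good_subarrays N K A) := by
  unfold Pre_count_good_subarrays; infer_instance
def pvWitness_count_good_subarrays : Int × Int × List Int := (4, 2, [1, 2, 1, 2])

def Spec_count_good_subarrays (N : Int) (K : Int) (A : List Int) (out : Int) : Prop := out = count_good_subarrays_alt N K A
instance (N : Int) (K : Int) (A : List Int) (out : Int) : Decidable (Spec_count_good_subarrays N K A out) := by unfold Spec_count_good_subarrays; infer_instance

-- ===== CLAIM (what is proved, stated in full; the proofs are below) =====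
def Claim_equal_count_good_subarrays : Prop := ∀ (N : Int) (K : Int) (A : List Int), Dom_count_good_subarrays N K A → Pre_count_good_subarrays N K A → Spec_count_good_subarrays N K A (count_good_subarrays N K A)

-- ===== LEMMAS AND PROOFS =====

-- number of dict entries whose value differs from K (what B's `bad` maintains)
def pvBad (K : Int) (l : List (Int × Int)) : Int := ((l.filter (fun p => p.2 ≠ K)).length : Int)

lemma pvBad_append (K : Int) (l₁ l₂ : List (Int × Int)) :
    pvBad K (l₁ ++ l₂) = pvBad K l₁ + pvBad K l₂ := by
  simp [pvBad, List.filter_append]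

-- replacing the unique entry with key x (value old) by (x, v) shifts pvBad by the two indicator terms
lemma pvBad_map_replace (K x old v : Int) :
    ∀ (l : List (Int × Int)), (l.map Prod.fst).Nodup → (x, old) ∈ l →
    pvBad K (l.map (fun p => if p.1 == x then (x, v) else p))
      = pvBad K l - (if old ≠ K then 1 else 0) + (if v ≠ K then 1 else 0) := by
  intro l
  induction l with
  | nil => intro _ h; simp at h
  | cons p rest ih =>
      intro hnd hmem
      simp only [List.map_cons, List.nodup_cons] at hnd
      rcases List.mem_cons.mp hmem with h | h
      · subst h
        have hrest : rest.map (fun p => if p.1 == x then (x, v) else p) = rest := by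
          apply List.map_congr_left ?_ |>.trans (List.map_id rest)
          intro a ha
          have : a.1 ≠ x := fun hx => hnd.1 (List.mem_map.mpr ⟨a, ha, hx⟩)
          simp [this]
        have hmap : ((x, old) :: rest).map (fun p => if p.1 == x then (x, v) else p)
            = (x, v) :: rest := by simp only [List.map_cons, hrest]; simp
        rw [hmap]
        by_cases hv : v = K <;> by_cases ho : old = K <;>
          first
          | (simp [pvBad, hv, ho]; push_cast; omega)
          | simp [pvBad, hv, ho]
      · have hne : p.1 ≠ x := by
          intro hx
          exact hnd.1 (hx ▸ List.mem_map_of_mem h)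
        have := ih hnd.2 h
        by_cases hp : p.2 = K <;> simp [pvBad, hne, hp] at this ⊢ <;> omega

-- A's goodness scan over a key list is an `all` over getD
lemma pvGoodScan_eq_all (K : Int) (d : PySem.Dict Int Int) (ks : List Int) :
    pvGoodScan K d ks = ks.all (fun k => d.getD k 0 = 0 ∨ d.getD k 0 = K) := by
  induction ks with
  | nil => rfl
  | cons k rest ih =>
      by_cases h : d.getD k 0 ≠ 0 ∧ d.getD k 0 ≠ K
      · have h' : ¬ (d.getD k 0 = 0 ∨ d.getD k 0 = K) := by tauto
        simp [pvGoodScan, h]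
      · have h' : d.getD k 0 = 0 ∨ d.getD k 0 = K := by tauto
        simp [pvGoodScan, h, h', ih]

-- with all values positive, A's goodness test is exactly `pvBad = 0`
lemma pvGoodScan_iff_bad_zero (K : Int) (d : PySem.Dict Int Int)
    (hnd : d.keys.Nodup) (hpos : ∀ p ∈ d.items, 0 < p.2) :
    (pvGoodScan K d d.keys = true) ↔ pvBad K d.items = 0 := by
  rw [pvGoodScan_eq_all]
  have hbad : pvBad K d.items = 0 ↔ ∀ p ∈ d.items, p.2 = K := by
    simp [pvBad, List.filter_eq_nil_iff]
  rw [hbad]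
  simp only [List.all_eq_true, decide_eq_true_eq]
  constructor
  · intro h p hp
    have hk : p.1 ∈ d.keys := PySem.Dict.mem_keys_of_mem_items d hp
    have hg : d.getD p.1 0 = p.2 := PySem.Dict.getD_of_mem_items d hp hnd 0
    rcases h p.1 hk with h0 | hK
    · exact absurd (hg ▸ h0) (by have := hpos p hp; omega)
    · exact hg ▸ hK
  · intro h k hk
    simp only [PySem.Dict.keys, List.mem_map] at hk
    obtain ⟨p, hp, hpk⟩ := hk
    right
    rw [← hpk, PySem.Dict.getD_of_mem_items d hp hnd 0]
    exact h p hp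

-- the two inner steps build the same dict, keep the invariant, and produce the same counter
lemma step_agree (K : Int) (A : List Int) (d : PySem.Dict Int Int) (b c e : Int)
    (hnd : d.keys.Nodup) (hpos : ∀ p ∈ d.items, 0 < p.2) (hb : b = pvBad K d.items) :
    (pvAStep K A (d, c) e).1 = (pvBStep K A (d, b, c) e).1 ∧
    (pvAStep K A (d, c) e).2 = (pvBStep K A (d, b, c) e).2.2 ∧
    (pvBStep K A (d, b, c) e).1.keys.Nodup ∧
    (∀ p ∈ (pvBStep K A (d, b, c) e).1.items, 0 < p.2) ∧
    (pvBStep K A (d, b, c) e).2.1 = pvBad K (pvBStep K A (d, b, c) e).1.items := by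
  set x : Int := (PySem.List.pyGet? A e).getD 0 with hx
  set old : Int := d.getD x 0 with hold
  have hdictA : (pvAStep K A (d, c) e).1 = d.insert x (old + 1) := by
    by_cases hc : d.contains x = true
    · simp [pvAStep, ← hx, hc, ← hold]
    · have h0 : old = 0 := by
        rw [hold]; exact PySem.Dict.getD_of_not_contains d 0 (by simpa using hc)
      simp [pvAStep, ← hx, hc, h0]
  have hnd' : (d.insert x (old + 1)).keys.Nodup := PySem.Dict.nodup_keys_insert d x _ hnd
  have hbad' : pvBad K (d.insert x (old + 1)).items
      = b + (if old ≠ 0 ∧ old ≠ K then -1 else 0) + (if old + 1 ≠ K then 1 else 0) := by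
    by_cases hc : d.contains x = true
    · -- key present: value old > 0, items are mapped in place
      have hget : d.get? x = some old := by
        rcases h : d.get? x with _ | v
        · rw [PySem.Dict.contains_eq_isSome_get? d x, h] at hc; simp at hc
        · rw [hold, PySem.Dict.getD_eq_get?_getD, h]; rfl
      have hmem : (x, old) ∈ d.items := PySem.Dict.mem_items_of_get?_eq_some d hget
      have hopos : 0 < old := hpos _ hmem
      rw [PySem.Dict.items_insert_of_contains d (old + 1) hc,
        pvBad_map_replace K x old (old + 1) d.items hnd hmem, hb]
      have h0 : old ≠ 0 := by omega
      by_cases h1 : old = K <;> simp [h0, h1] <;> omega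
    · have h0 : old = 0 := by
        rw [hold]; exact PySem.Dict.getD_of_not_contains d 0 (by simpa using hc)
      rw [PySem.Dict.items_insert_of_not_contains d (old + 1) (by simpa using hc),
        pvBad_append, hb, h0]
      have e1 : (0 : Int) + 1 = 1 := by omega
      rw [e1]
      by_cases h1 : (1 : Int) = K <;> simp [pvBad, h1]
  have hposm : ∀ p ∈ (d.insert x (old + 1)).items, 0 < p.2 := by
    intro p hp
    rw [PySem.Dict.mem_items_insert d x (old + 1) p] at hp
    rcases hp with hp | hp
    · have hop : 0 ≤ old := by
        by_cases hc : d.contains x = true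
        · have hget : d.get? x = some old := by
            rcases h : d.get? x with _ | v
            · rw [PySem.Dict.contains_eq_isSome_get? d x, h] at hc; simp at hc
            · rw [hold, PySem.Dict.getD_eq_get?_getD, h]; rfl
          exact le_of_lt (hpos _ (PySem.Dict.mem_items_of_get?_eq_some d hget))
        · have : old = 0 := by
            rw [hold]; exact PySem.Dict.getD_of_not_contains d 0 (by simpa using hc)
          omega
      subst hp; simpa using by omega
    · exact hpos _ hp.1
  have hdictB : (pvBStep K A (d, b, c) e).1 = d.insert x (old + 1) := rfl
  have hbB : (pvBStep K A (d, b, c) e).2.1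
      = b + (if old ≠ 0 ∧ old ≠ K then -1 else 0) + (if old + 1 ≠ K then 1 else 0) := rfl
  refine ⟨by rw [hdictA, hdictB], ?_, by rw [hdictB]; exact hnd',
    by rw [hdictB]; exact hposm, by rw [hdictB, hbB, hbad']⟩
  -- counters agree: A tests pvGoodScan, B tests bad = 0
  have hgood : (pvGoodScan K (d.insert x (old + 1)) (d.insert x (old + 1)).keys = true)
      ↔ (pvBStep K A (d, b, c) e).2.1 = 0 := by
    rw [pvGoodScan_iff_bad_zero K _ hnd' hposm, hbB, hbad']
  have hA2 : (pvAStep K A (d, c) e).2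
      = (if pvGoodScan K (d.insert x (old + 1)) (d.insert x (old + 1)).keys
         then PySem.Int.mod (c + 1) (10 ^ 9 + 7) else c) := by
    conv_lhs => rw [show (pvAStep K A (d, c) e).2
      = (if pvGoodScan K (pvAStep K A (d, c) e).1 (pvAStep K A (d, c) e).1.keys
         then PySem.Int.mod (c + 1) (10 ^ 9 + 7) else c) from rfl]
    rw [hdictA]
  have hB2 : (pvBStep K A (d, b, c) e).2.2
      = (if (pvBStep K A (d, b, c) e).2.1 = 0
         then PySem.Int.mod (c + 1) (10 ^ 9 + 7) else c) := rfl
  rw [hA2, hB2]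
  by_cases hg : pvGoodScan K (d.insert x (old + 1)) (d.insert x (old + 1)).keys = true
  · rw [if_pos hg, if_pos (hgood.mp hg)]
  · rw [if_neg hg, if_neg (fun h => hg (hgood.mpr h))]

-- the inner loops agree on any list of indices, from any invariant-respecting state
lemma inner_agree (K : Int) (A : List Int) :
    ∀ (is : List Int) (d : PySem.Dict Int Int) (b c : Int),
      d.keys.Nodup → (∀ p ∈ d.items, 0 < p.2) → b = pvBad K d.items →
      (is.foldl (pvAStep K A) (d, c)).2 = (is.foldl (pvBStep K A) (d, b, c)).2.2 := by
  intro is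
  induction is with
  | nil => intro d b c _ _ _; rfl
  | cons e rest ih =>
      intro d b c hnd hpos hb
      obtain ⟨h1, h2, h3, h4, h5⟩ := step_agree K A d b c e hnd hpos hb
      simp only [List.foldl_cons]
      have hA : pvAStep K A (d, c) e
          = ((pvBStep K A (d, b, c) e).1, (pvBStep K A (d, b, c) e).2.2) := by
        exact Prod.ext h1 h2
      rw [hA]
      have hB : pvBStep K A (d, b, c) e
          = ((pvBStep K A (d, b, c) e).1, (pvBStep K A (d, b, c) e).2.1,
              (pvBStep K A (d, b, c) e).2.2) := rfl
      rw [hB]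
      exact ih _ _ _ h3 h4 h5

-- ===== VERDICT (by name: the statement is the Claim_ definition above) =====
theorem count_good_subarrays_spec : Claim_equal_count_good_subarrays := by
  intro N K A _ _
  show count_good_subarrays N K A = count_good_subarrays_alt N K A
  unfold count_good_subarrays count_good_subarrays_alt
  have hfun : (fun (cnt start : Int) =>
        ((PySem.List.pyRange start N 1).foldl (pvAStep K A) (PySem.Dict.empty, cnt)).2)
      = (fun (total start : Int) =>
        ((PySem.List.pyRange start N 1).foldl (pvBStep K A) (PySem.Dict.empty, 0, total)).2.2) := by
    funext cnt start
    exact inner_agree K A (PySem.List.pyRange start N 1) PySem.Dict.empty 0 cnt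
      PySem.Dict.nodup_keys_empty (by intro p hp; simp [PySem.Dict.empty] at hp) rfl
  rw [hfun]
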